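-- pv_equiv track=rewrite | github.com/hu-ict/planning_template | generate_planning.py | determine_sprints
-- ===== SOURCE A (Python) =====
-- def determine_sprints(weeks):
--     sprints = {}
--     for week in weeks:
--         if week["sprint"] != "":
--             if week["sprint"] in sprints:
--                 sprints[week["sprint"]] += 1
--             else:
--                 sprints[week["sprint"]] = 1
--     return sprints
-- ===== SOURCE B (Python) =====
-- def determine_sprints(weeks):
--     names = [week["sprint"] for week in weeks if week["sprint"] != ""]
--     return dict(_tally(names))
--
--
-- def _tally(names):
--     # Recursive grouping: peel off the first name, drop all its later
--     # occurrences, count it by the length difference, recurse on the rest.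
--     if not names:
--         return []
--     head, tail = names[0], names[1:]
--     rest = [x for x in tail if x != head]
--     return [(head, len(names) - len(rest))] + _tally(rest)
-- ===== Notes on version B (the rewrite author's own statement) =====
-- stated objective: alternative
-- what changed: Replaces A's single-pass running dict tally with a recursive partition-and-remove grouping: repeatedly take the first remaining sprint name, delete all its occurrences, derive its count from the length difference, and recurse on what is left.
import Mathlib
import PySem

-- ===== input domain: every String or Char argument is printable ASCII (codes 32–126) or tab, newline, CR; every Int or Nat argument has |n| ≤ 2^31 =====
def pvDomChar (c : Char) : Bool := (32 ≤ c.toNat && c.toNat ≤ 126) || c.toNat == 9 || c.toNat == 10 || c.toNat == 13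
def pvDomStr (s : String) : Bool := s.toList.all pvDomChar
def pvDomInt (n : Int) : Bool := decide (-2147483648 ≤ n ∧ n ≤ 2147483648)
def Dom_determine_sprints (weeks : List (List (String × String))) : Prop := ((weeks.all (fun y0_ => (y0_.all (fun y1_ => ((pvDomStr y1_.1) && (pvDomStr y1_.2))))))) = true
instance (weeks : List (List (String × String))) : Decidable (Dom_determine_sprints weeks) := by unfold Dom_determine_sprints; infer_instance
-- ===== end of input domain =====

-- B replaces A's running tally dict with a recursive partition-and-remove grouping (alternative decomposition, same results).


-- ===== PORT A =====
-- week["sprint"] : first-match lookup in the week dict; Pre_ guarantees the key exists, so getD "" never fires inside Pre_.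
def pvSprintOf (week : List (String × String)) : String :=
  ((PySem.Dict.mk week).get? "sprint").getD ""

def determine_sprints (weeks : List (List (String × String))) : List (String × Int) :=
  (weeks.foldl (fun sprints week =>
      let s := pvSprintOf week
      if s ≠ "" then
        if sprints.contains s then sprints.insert s (sprints.getD s 0 + 1)
        else sprints.insert s 1
      else sprints) PySem.Dict.empty).items

-- ===== PORT B =====
-- _tally: recursion on the filtered name list; the recursive call's keys are all ≠ head,
-- so 'dict(pairs)' in Source B is exactly this association list (pairwise-distinct keys).
def pvTally (names : List String) : List (String × Int) :=
  match names with
  | [] => []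
  | head :: tail =>
    let rest := tail.filter (fun x => x ≠ head)
    (head, (((head :: tail).length : Nat) : Int) - (rest.length : Int)) :: pvTally rest
termination_by names.length
decreasing_by
  simp only [List.length_cons, List.length_unattach]
  exact Nat.lt_succ_of_le (le_trans (List.length_filter_le _ _) (by simp))

def determine_sprints_alt (weeks : List (List (String × String))) : List (String × Int) :=
  pvTally ((weeks.filter (fun w => pvSprintOf w ≠ "")).map pvSprintOf)

-- ===== PRECONDITION & SPEC =====
-- Pre_ excludes exactly the inputs where week["sprint"] raises KeyError in Python: a week dict without the key "sprint".
def Pre_determine_sprints (weeks : List (List (String × String))) : Prop :=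
  ∀ week ∈ weeks, (PySem.Dict.mk week).contains "sprint" = true
instance (weeks : List (List (String × String))) : Decidable (Pre_determine_sprints weeks) := by unfold Pre_determine_sprints; infer_instance

def pvWitness_determine_sprints : (List (List (String × String))) :=
  [[("sprint", "s1")], [("sprint", "")], [("sprint", "s1")], [("sprint", "s2")]]

def Spec_determine_sprints (weeks : List (List (String × String))) (out : List (String × Int)) : Prop := out = determine_sprints_alt weeks
instance (weeks : List (List (String × String))) (out : List (String × Int)) : Decidable (Spec_determine_sprints weeks out) := by unfold Spec_determine_sprints; infer_instance

-- ===== CLAIM (what is proved, stated in full; the proofs are below) =====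
def Claim_equal_determine_sprints : Prop := ∀ (weeks : List (List (String × String))), Dom_determine_sprints weeks → Pre_determine_sprints weeks → Spec_determine_sprints weeks (determine_sprints weeks)

-- ===== LEMMAS AND PROOFS =====
-- A's loop body equals the canonical counter step: when the key is absent, getD is 0.
lemma detspr_step_eq (d : PySem.Dict String Int) (s : String) :
    (if s ≠ "" then
        if d.contains s then d.insert s (d.getD s 0 + 1)
        else d.insert s 1
      else d)
    = (if s ≠ "" then d.insert s (d.getD s 0 + 1) else d) := by
  by_cases hs : s = "" <;> simp [hs]
  by_cases hc : d.contains s <;>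
    simp [hc, PySem.Dict.getD_of_not_contains]

-- A's fold over weeks equals the counter fold over the filtered-and-mapped sprint names.
lemma detspr_fold_eq (weeks : List (List (String × String))) (d : PySem.Dict String Int) :
    weeks.foldl (fun sprints week =>
        let s := pvSprintOf week
        if s ≠ "" then
          if sprints.contains s then sprints.insert s (sprints.getD s 0 + 1)
          else sprints.insert s 1
        else sprints) d
    = ((weeks.filter (fun w => pvSprintOf w ≠ "")).map pvSprintOf).foldl
        (fun d x => d.insert x (d.getD x 0 + 1)) d := by
  induction weeks generalizing d with
  | nil => rfl
  | cons w ws ih =>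
    simp only [List.foldl_cons]
    rw [detspr_step_eq]
    by_cases hw : pvSprintOf w = ""
    · rw [if_neg (not_not_intro hw)]
      have hf : List.filter (fun x => decide (pvSprintOf x ≠ "")) (w :: ws)
          = List.filter (fun x => decide (pvSprintOf x ≠ "")) ws := by
        simp [hw]
      rw [hf]
      exact ih d
    · rw [if_pos hw]
      have hf : List.filter (fun x => decide (pvSprintOf x ≠ "")) (w :: ws)
          = w :: List.filter (fun x => decide (pvSprintOf x ≠ "")) ws := by
        simp [hw]
      rw [hf, List.map_cons, List.foldl_cons]
      exact ih _

-- dedup commutes with removing all occurrences of one value.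
lemma detspr_discard_ofList (t : List String) (h : String) :
    PySem.Set.discard (PySem.Set.ofList t) h
      = PySem.Set.ofList (t.filter (fun x => x ≠ h)) := by
  induction t with
  | nil => rfl
  | cons a t' ih =>
    rw [PySem.Set.ofList_cons]
    by_cases hah : a = h
    · subst hah
      have h1 : List.filter (fun x => decide (x ≠ a)) (a :: t')
          = t'.filter (fun x => decide (x ≠ a)) := by simp
      rw [h1, ← ih]
      show List.filter (fun y => !(y == a)) (a :: List.filter (fun y => !(y == a)) (PySem.Set.ofList t'))
          = List.filter (fun y => !(y == a)) (PySem.Set.ofList t')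
      simp [List.filter_filter]
    · have h1 : List.filter (fun x => decide (x ≠ h)) (a :: t')
          = a :: t'.filter (fun x => decide (x ≠ h)) := by simp [hah]
      rw [h1, PySem.Set.ofList_cons, ← ih]
      show List.filter (fun y => !(y == h)) (a :: List.filter (fun y => !(y == a)) (PySem.Set.ofList t'))
          = a :: List.filter (fun y => !(y == a)) (List.filter (fun y => !(y == h)) (PySem.Set.ofList t'))
      have hb : (!(a == h)) = true := by simp [hah]
      simp only [List.filter_cons, hb, if_true, List.filter_filter]
      congr 1
      apply List.filter_congr
      intro x _
      exact Bool.and_comm _ _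

-- helper: filtering through attach/unattach (from pvTally's compiled recursion).
lemma detspr_unattach_filter_attach (tail : List String) (p : String → Bool) :
    (List.filter (fun x => p x.1) tail.attach).unattach = List.filter p tail := by
  rw [List.unattach]
  calc List.map (fun x => x.1) (List.filter (fun x => p x.1) tail.attach)
      = List.map Subtype.val (List.filter (p ∘ Subtype.val) tail.attach) := rfl
    _ = List.filter p (List.map Subtype.val tail.attach) := (List.filter_map).symm
    _ = List.filter p tail := by rw [List.attach_map_subtype_val]

-- B's recursion computes set(names) paired with each name's count in names.
lemma detspr_tally_eq (names : List String) :
    pvTally names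
      = (PySem.Set.ofList names).map (fun k => (k, (names.count k : Int))) := by
  induction names using pvTally.induct with
  | case1 => simp [pvTally]
  | case2 head tail r ih =>
    have hr : r = tail.filter (fun x => decide (x ≠ head)) := by
      show (List.filter (fun x => decide (x.1 ≠ head)) tail.attach).unattach = _
      exact detspr_unattach_filter_attach tail (fun x => decide (x ≠ head))
    rw [hr] at ih
    rw [pvTally, PySem.Set.ofList_cons, detspr_discard_ofList, List.map_cons, ih]
    congr 1
    · congr 1
      have h2 : List.count head tail
          = List.countP (fun x => !decide (x ≠ head)) tail := by
        rw [List.count]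
        apply List.countP_congr
        intro x _
        by_cases hx : x = head <;> simp [hx]
      have h1 : (List.filter (fun x => decide (x ≠ head)) tail).length
          + List.count head tail = tail.length := by
        rw [← List.countP_eq_length_filter, h2]
        have h3 := List.length_eq_countP_add_countP (fun x => decide (x ≠ head)) (l := tail)
        simpa using h3.symm
      rw [List.count_cons_self]
      simp only [List.length_cons]
      push_cast
      omega
    · apply List.map_congr_left
      intro k hk
      have hk' : k ∈ tail.filter (fun x => decide (x ≠ head)) :=
        (PySem.Set.mem_ofList _ _).mp hk
      have hkh : k ≠ head := by
        have := List.of_mem_filter hk'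
        simpa using this
      have hc : List.count k (head :: tail) = List.count k tail :=
        List.count_cons_of_ne (Ne.symm hkh)
      have hf : List.count k (List.filter (fun x => decide (x ≠ head)) tail)
          = List.count k tail := List.count_filter (by simp [hkh])
      rw [hc, hf]

-- ===== VERDICT (by name: the statement is the Claim_ definition above) =====
theorem determine_sprints_spec : Claim_equal_determine_sprints := by
  intro weeks _ _
  unfold Spec_determine_sprints determine_sprints determine_sprints_alt
  rw [detspr_fold_eq, PySem.Dict.foldl_insert_getD_add_one_eq_counter,
      PySem.Dict.items_counter, detspr_tally_eq]
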